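-- pv_equiv track=rewrite | github.com/AadityaPanda/CodeQuotient-Pre-Course | SuperCoders Pre-Course/7. Sorting/7.6.py | reduceArray
-- ===== SOURCE A (Python) =====
-- def reduceArray(arr):
--     c=list(arr)
--     d=[]
--     for l in range(0,len(c)):
--         b=min(c)
--         e=0
--         for j in range(len(c)):
--             c[j]=c[j]-b
--             e+=1
--         c=list(filter(lambda x:x!=0,c))
--         d.append(e)
--         if len(c)==0:
--             return(d)
-- ===== SOURCE B (Python) =====
-- def reduceArray(arr):
--     s = sorted(arr)
--     n = len(s)
--     d = []
--     i = 0
--     while i < n: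
--         d.append(n - i)
--         v = s[i]
--         while i < n and s[i] == v:
--             i += 1
--     return d
-- ===== Notes on version B (the rewrite author's own statement) =====
-- stated objective: faster
-- what changed: Instead of repeatedly subtracting the minimum and filtering zeros (a pass per distinct value), B sorts once and emits the remaining-suffix length at the start of each group of equal values.
-- outside the precondition, e.g. on reduceArray([]): A returns None, B returns []
import Mathlib
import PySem

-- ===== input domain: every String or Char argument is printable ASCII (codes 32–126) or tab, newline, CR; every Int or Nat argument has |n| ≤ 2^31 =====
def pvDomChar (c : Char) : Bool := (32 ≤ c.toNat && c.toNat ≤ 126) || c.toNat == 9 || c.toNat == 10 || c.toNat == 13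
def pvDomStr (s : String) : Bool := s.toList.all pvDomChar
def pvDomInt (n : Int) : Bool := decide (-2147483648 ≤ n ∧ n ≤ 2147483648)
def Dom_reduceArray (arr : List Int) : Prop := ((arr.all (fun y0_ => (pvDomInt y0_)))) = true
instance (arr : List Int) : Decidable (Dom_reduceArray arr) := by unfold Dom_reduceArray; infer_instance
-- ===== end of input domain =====

-- B sorts once and emits the remaining-suffix length at each group of equal values,
-- replacing A's subtract-min-and-filter pass per distinct value (objective: faster).

-- ===== PORT A =====
-- outer 'for l in range(0, len(c))' as fuel-counted recursion; each round:
-- b = min(c); inner j-loop builds (c with b subtracted, counter e) as a foldl over a pair;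
-- then filter non-zeros, append e, early return when empty.
def aLoop : Nat → List Int → List Int → List Int
  | 0, _, d => d          -- loop exhausted (Python falls off and returns None; outside Pre_)
  | l + 1, c, d =>
    let b := (PySem.List.min? c (fun x => x)).getD 0
    let p := c.foldl (fun (acc : List Int × Int) x => (acc.1 ++ [x - b], acc.2 + 1)) ([], 0)
    let c2 := p.1.filter (fun x => x ≠ 0)
    let d' := d ++ [p.2]
    if c2.length = 0 then d' else aLoop l c2 d'

def reduceArray (arr : List Int) : List Int := aLoop arr.length arr []

-- ===== PORT B =====
-- inner 'while i < n and s[i] == v: i += 1' : advance past the group of values equal to v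
def skipEq (v : Int) : List Int → List Int
  | [] => []
  | x :: t => if x = v then skipEq v t else x :: t

theorem skipEq_length_le (v : Int) (t : List Int) : (skipEq v t).length ≤ t.length := by
  induction t with
  | nil => simp [skipEq]
  | cons x t ih => simp only [skipEq]; split; (simp; omega); (simp)

-- outer 'while i < n': the current suffix s[i:]; append its length (= n - i), skip the group
def bLoop : List Int → List Int
  | [] => []
  | v :: t => ((v :: t).length : Int) :: bLoop (skipEq v t)
  termination_by s => s.length
  decreasing_by simpa using Nat.lt_succ_of_le (skipEq_length_le v t)

def reduceArray_alt (arr : List Int) : List Int :=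
  bLoop (PySem.List.sorted arr (fun x => x) false)

-- ===== PRECONDITION & SPEC =====
-- Pre_ excludes only the empty list, on which A falls off its loop and returns None (not a list).
def Pre_reduceArray (arr : List Int) : Prop := arr ≠ []
instance (arr : List Int) : Decidable (Pre_reduceArray arr) := by unfold Pre_reduceArray; infer_instance
def pvWitness_reduceArray : List Int := [3, 1, 2, 1]

def Spec_reduceArray (arr : List Int) (out : List Int) : Prop := out = reduceArray_alt arr
instance (arr : List Int) (out : List Int) : Decidable (Spec_reduceArray arr out) := by unfold Spec_reduceArray; infer_instance

-- ===== CLAIM (what is proved, stated in full; the proofs are below) =====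
def Claim_equal_reduceArray : Prop := ∀ (arr : List Int), Dom_reduceArray arr → Pre_reduceArray arr → Spec_reduceArray arr (reduceArray arr)

-- ===== LEMMAS AND PROOFS =====

-- the inner j-loop fold computes (prefix ++ shifted list, counter + length)
theorem foldl_sub_pair (b : Int) (c : List Int) (a1 : List Int) (a2 : Int) :
    c.foldl (fun (acc : List Int × Int) x => (acc.1 ++ [x - b], acc.2 + 1)) (a1, a2)
      = (a1 ++ c.map (fun x => x - b), a2 + (c.length : Int)) := by
  induction c generalizing a1 a2 with
  | nil => simp
  | cons x t ih => simp [List.foldl_cons, ih]; omega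

theorem foldl_min_shift (t : Int) (rest : List Int) (x : Int) :
    (rest.map (fun y => y + t)).foldl min (x + t) = rest.foldl min x + t := by
  induction rest generalizing x with
  | nil => simp
  | cons y r ih =>
    simp only [List.map_cons, List.foldl_cons]
    rw [← min_add x y t]
    exact ih (min x y)

theorem min_spec (x : Int) (rest : List Int) :
    rest.foldl min x ∈ x :: rest ∧ ∀ y ∈ x :: rest, rest.foldl min x ≤ y := by
  have h : PySem.List.min? (x :: rest) (fun y => y) = some (rest.foldl min x) :=
    PySem.List.min?_id_cons x rest
  exact ⟨PySem.List.min?_mem h, fun y hy => PySem.List.min?_isMin h y hy⟩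

-- on a sorted tail whose elements are all ≥ v, skipping the leading v-group is filtering v out
theorem skipEq_eq_filter (v : Int) (t : List Int)
    (hp : t.Pairwise (fun a b => a ≤ b)) (hlb : ∀ x ∈ t, v ≤ x) :
    skipEq v t = t.filter (fun x => x ≠ v) := by
  induction t with
  | nil => rfl
  | cons x r ih =>
    rcases List.pairwise_cons.mp hp with ⟨hx, hr⟩
    by_cases hxv : x = v
    · simp [skipEq, hxv, ih hr (fun y hy => hlb y (by simp [hy]))]
    · have hvx : v < x := lt_of_le_of_ne (hlb x (by simp)) (Ne.symm hxv)
      have hrf : List.filter (fun y => decide (y ≠ v)) r = r :=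
        List.filter_eq_self.mpr (fun y hy => by have := hx y hy; simp; omega)
      simp only [skipEq, if_neg hxv, List.filter_cons]
      rw [if_pos (by simp [hxv])]
      rw [hrf]

-- the B-side step: one group of the sorted list ↔ one round of A (removing the minimum value m)
theorem bLoop_step (c : List Int) (x : Int) (rest : List Int) (hc : c = x :: rest) :
    bLoop (PySem.List.sorted c (fun y => y) false)
      = (c.length : Int) :: bLoop (PySem.List.sorted (c.filter (fun y => y ≠ rest.foldl min x)) (fun y => y) false) := by
  set m := rest.foldl min x with hm
  have hmem : m ∈ c := by rw [hc]; exact (min_spec x rest).1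
  have hmin : ∀ y ∈ c, m ≤ y := by rw [hc]; exact (min_spec x rest).2
  have hne : c ≠ [] := by rw [hc]; simp
  obtain ⟨v, t, hs⟩ : ∃ v t, PySem.List.sorted c (fun y => y) false = v :: t := by
    cases hsor : PySem.List.sorted c (fun y => y) false with
    | nil => exact absurd ((PySem.List.sorted_eq_nil_iff c (fun y => y) false).mp hsor) hne
    | cons v t => exact ⟨v, t, rfl⟩
  have hperm : (PySem.List.sorted c (fun y => y) false).Perm c :=
    PySem.List.sorted_perm c (fun y => y) false
  have hvm : v = m := by
    have hvc : v ∈ c := hperm.mem_iff.mp (by rw [hs]; simp)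
    have h1 : m ≤ v := hmin v hvc
    have h2 : v ≤ m := PySem.List.key_head_sorted_le c (fun y => y) hs m hmem
    omega
  have hpw : (v :: t).Pairwise (fun a b => a ≤ b) := by
    rw [← hs]; exact PySem.List.sorted_pairwise c (fun y => y)
  rcases List.pairwise_cons.mp hpw with ⟨hvt, htp⟩
  have hskip : skipEq v t = t.filter (fun y => y ≠ v) := skipEq_eq_filter v t htp hvt
  have hsf : PySem.List.sorted (c.filter (fun y => y ≠ m)) (fun y => y) false
      = t.filter (fun y => y ≠ m) := by
    apply PySem.List.sorted_id_eq_of_perm_of_pairwise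
    · have h1 : ((v :: t).filter (fun y => y ≠ m)).Perm (c.filter (fun y => y ≠ m)) :=
        (hs ▸ hperm).filter _
      simpa [List.filter_cons, hvm] using h1
    · exact htp.filter _
  rw [hs]
  simp only [bLoop]
  rw [hskip, hvm, hsf]
  have hlen : (m :: t).length = c.length := by
    have := hperm.length_eq; rw [hs] at this; simp at this ⊢; omega
  rw [hlen]

-- main invariant: A's loop on a shifted copy of c produces B's answer for c
theorem aLoop_eq (fuel : Nat) : ∀ (c : List Int) (d : List Int) (t : Int),
    c ≠ [] → c.length ≤ fuel →
    aLoop fuel (c.map (fun y => y + t)) d = d ++ bLoop (PySem.List.sorted c (fun y => y) false) := by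
  induction fuel with
  | zero => intro c d t hne hlen; cases c <;> simp_all
  | succ l ih =>
    intro c d t hne hlen
    obtain ⟨x, rest, rfl⟩ : ∃ x rest, c = x :: rest := by
      cases c with | nil => exact absurd rfl hne | cons x rest => exact ⟨x, rest, rfl⟩
    set m := rest.foldl min x with hm
    have hminval : PySem.List.min? ((x :: rest).map (fun y => y + t)) (fun y => y) = some (m + t) := by
      rw [List.map_cons, PySem.List.min?_id_cons, foldl_min_shift]
    have hsub : ((x :: rest).map (fun y => y + t)).map (fun y => y - (m + t))
        = (x :: rest).map (fun y => y - m) := by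
      rw [List.map_map]; apply List.map_congr_left; intro y _; simp only [Function.comp_apply]; omega
    have hfilter : (((x :: rest).map (fun y => y - m)).filter (fun y => y ≠ 0))
        = ((x :: rest).filter (fun y => y ≠ m)).map (fun y => y + (-m)) := by
      rw [List.filter_map]
      congr 1
      apply List.filter_congr; intro y _; simp [Function.comp]; omega
    simp only [aLoop, hminval, Option.getD_some, foldl_sub_pair, List.nil_append,
      List.length_map, Int.zero_add, hsub, hfilter]
    have hmem : m ∈ x :: rest := (min_spec x rest).1
    have hflen : ((x :: rest).filter (fun y => y ≠ m)).length < (x :: rest).length := by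
      apply List.length_filter_lt_length_iff_exists.mpr
      exact ⟨m, hmem, by simp⟩
    by_cases hz : ((x :: rest).filter (fun y => y ≠ m)).length = 0
    · have hfe : (x :: rest).filter (fun y => y ≠ m) = [] := List.length_eq_zero_iff.mp hz
      rw [if_pos (by simpa using hz)]
      rw [bLoop_step (x :: rest) x rest rfl, ← hm, hfe]
      have hnil : PySem.List.sorted ([] : List Int) (fun y => y) false = [] :=
        (PySem.List.sorted_eq_nil_iff [] (fun y => y) false).mpr rfl
      rw [hnil]
      simp [bLoop]
    · have hfne : (x :: rest).filter (fun y => y ≠ m) ≠ [] := by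
        intro h; exact hz (by rw [h]; rfl)
      rw [if_neg (by simpa using hz)]
      rw [ih _ (d ++ [((x :: rest).length : Int)]) (-m) hfne (by simp at hlen hflen ⊢; omega)]
      rw [bLoop_step (x :: rest) x rest rfl, ← hm]
      simp
-- ===== VERDICT (by name: the statement is the Claim_ definition above) =====
theorem reduceArray_spec : Claim_equal_reduceArray := by
  intro arr _ hpre
  show reduceArray arr = reduceArray_alt arr
  unfold reduceArray reduceArray_alt
  have := aLoop_eq arr.length arr [] 0 hpre le_rfl
  simpa using this
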